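-- pv_equiv track=rewrite | github.com/league-infrastructure/lesson-builder | src/lesson_builder/buildlevels.py | add_after_h1
-- ===== SOURCE A (Python) =====
-- def add_after_h1(markdown_text, string_to_add):
--     lines = markdown_text.split('\n')
--
--     for i, line in enumerate(lines):
--         if line.startswith('# '):
--             lines.insert(i + 1, string_to_add + '\n')
--             break
--     # Join the lines back into a single string
--     o = '\n'.join(lines)
--
--     return o
-- ===== SOURCE B (Python) =====
-- def add_after_h1(markdown_text, string_to_add):
--     # Stream over the text one line at a time; never builds the list of all
--     # lines: stops at the first H1 and appends the untouched remainder wholesale.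
--     out = []
--     rest = markdown_text
--     while True:
--         head, sep, tail = rest.partition('\n')
--         if head.startswith('# '):
--             out.append(head + '\n' + string_to_add + '\n' + sep + tail)
--             return ''.join(out)
--         if not sep:
--             return markdown_text
--         out.append(head + '\n')
--         rest = tail
-- ===== Notes on version B (the rewrite author's own statement) =====
-- stated objective: alternative
-- what changed: B streams over the text one partition('\n') line at a time with an output accumulator and stops at the first H1, appending the untouched remainder wholesale, instead of splitting the whole text into a line list, inserting into it and rejoining every line.
import Mathlib
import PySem

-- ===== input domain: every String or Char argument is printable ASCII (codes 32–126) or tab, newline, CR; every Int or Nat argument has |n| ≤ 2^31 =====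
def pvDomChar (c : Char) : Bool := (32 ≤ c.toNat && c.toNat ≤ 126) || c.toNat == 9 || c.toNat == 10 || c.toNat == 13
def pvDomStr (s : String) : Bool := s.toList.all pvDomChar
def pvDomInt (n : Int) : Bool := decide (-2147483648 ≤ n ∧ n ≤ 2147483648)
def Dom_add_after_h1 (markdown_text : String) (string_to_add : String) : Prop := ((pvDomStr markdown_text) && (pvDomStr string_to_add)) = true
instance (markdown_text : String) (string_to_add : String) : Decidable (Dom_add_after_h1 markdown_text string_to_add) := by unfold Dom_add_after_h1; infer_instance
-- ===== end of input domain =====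

-- B streams over the text one line at a time and stops at the first H1, instead of
-- splitting the whole text into a line list, inserting and rejoining (objective: alternative).

-- ===== PORT A =====
-- the for-loop over enumerate(lines): on the first line starting with '# ' insert
-- string_to_add+'\n' right after it and stop; otherwise keep scanning.
def addLoopA (sAdd : List Char) : List (List Char) → List (List Char)
  | [] => []
  | l :: rest =>
      if PySem.Chars.startswith l ['#', ' '] then
        l :: (sAdd ++ ['\n']) :: rest
      else
        l :: addLoopA sAdd rest

def add_after_h1 (markdown_text : String) (string_to_add : String) : String :=
  let lines := PySem.Chars.splitOn markdown_text.toList ['\n']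
  String.ofList (PySem.Chars.join ['\n'] (addLoopA string_to_add.toList lines))

-- ===== PORT B =====
-- the while-loop of Source B: rest.partition('\n') is ported exactly for the one-character
-- separator as (takeWhile (· ≠ '\n'), dropWhile (· ≠ '\n')) — the dropWhile part is
-- sep ++ tail (empty iff '\n' is absent); out is the accumulated ''.join list.
def bLoop (t sAdd : List Char) (out : List (List Char)) (rest : List Char) : List Char :=
  let head := rest.takeWhile (· ≠ '\n')
  if PySem.Chars.startswith head ['#', ' '] then
    PySem.Chars.join [] (out ++ [head ++ '\n' :: (sAdd ++ '\n' :: rest.dropWhile (· ≠ '\n'))])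
  else
    match h : rest.dropWhile (· ≠ '\n') with
    | [] => t
    | _ :: tail => bLoop t sAdd (out ++ [head ++ ['\n']]) tail
termination_by rest.length
decreasing_by
  have h1 : (rest.dropWhile (· ≠ '\n')).length ≤ rest.length := List.length_dropWhile_le _ _
  rw [h] at h1
  simpa using Nat.lt_of_lt_of_le (Nat.lt_succ_self _) h1

def add_after_h1_alt (markdown_text : String) (string_to_add : String) : String :=
  String.ofList (bLoop markdown_text.toList string_to_add.toList [] markdown_text.toList)

-- ===== PRECONDITION & SPEC =====
def Spec_add_after_h1 (markdown_text : String) (string_to_add : String) (out : String) : Prop := out = add_after_h1_alt markdown_text string_to_add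
instance (markdown_text : String) (string_to_add : String) (out : String) : Decidable (Spec_add_after_h1 markdown_text string_to_add out) := by unfold Spec_add_after_h1; infer_instance

-- ===== CLAIM (what is proved, stated in full; the proofs are below) =====
def Claim_equal_add_after_h1 : Prop := ∀ (markdown_text : String) (string_to_add : String), Dom_add_after_h1 markdown_text string_to_add → Spec_add_after_h1 markdown_text string_to_add (add_after_h1 markdown_text string_to_add)

-- ===== LEMMAS AND PROOFS =====

-- reference line splitter: what splitting on a single '\n' produces
def linesRef (cs : List Char) : List (List Char) :=
  match h : cs.dropWhile (· ≠ '\n') with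
  | [] => [cs]
  | _ :: rest => cs.takeWhile (· ≠ '\n') :: linesRef rest
termination_by cs.length
decreasing_by
  have h1 : (cs.dropWhile (· ≠ '\n')).length ≤ cs.length := List.length_dropWhile_le _ _
  rw [h] at h1
  simpa using Nat.lt_of_lt_of_le (Nat.lt_succ_self _) h1

theorem linesRef_ne_nil (cs : List Char) : linesRef cs ≠ [] := by
  rw [linesRef]
  split <;> simp

theorem linesRef_of_drop_nil (cs : List Char) (h : cs.dropWhile (· ≠ '\n') = []) :
    linesRef cs = [cs] := by
  rw [linesRef]
  split
  · rfl
  · next x rest h2 => rw [h] at h2; cases h2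

theorem linesRef_of_drop_cons (cs : List Char) (x : Char) (rest : List Char)
    (h : cs.dropWhile (· ≠ '\n') = x :: rest) :
    linesRef cs = cs.takeWhile (· ≠ '\n') :: linesRef rest := by
  rw [linesRef]
  split
  · next h2 => rw [h] at h2; cases h2
  · next y r h2 =>
    rw [h] at h2
    cases h2
    rfl

theorem drop_head_newline : ∀ (cs : List Char) (x : Char) (rest : List Char),
    cs.dropWhile (· ≠ '\n') = x :: rest → x = '\n' := by
  intro cs
  induction cs with
  | nil => intro x rest h; cases h
  | cons c t ih =>
    intro x rest h
    by_cases hc : c = '\n'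
    · subst hc
      rw [List.dropWhile_cons, if_neg (by simp)] at h
      cases h
      rfl
    · rw [List.dropWhile_cons, if_pos (by simp [hc])] at h
      exact ih x rest h

theorem take_drop_split (cs : List Char) (x : Char) (rest : List Char)
    (h : cs.dropWhile (· ≠ '\n') = x :: rest) :
    cs.takeWhile (· ≠ '\n') ++ x :: rest = cs := by
  have := List.takeWhile_append_dropWhile (p := (· ≠ '\n')) (l := cs)
  rw [h] at this
  exact this

theorem take_eq_of_drop_nil (cs : List Char) (h : cs.dropWhile (· ≠ '\n') = []) :
    cs.takeWhile (· ≠ '\n') = cs := by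
  have := List.takeWhile_append_dropWhile (p := (· ≠ '\n')) (l := cs)
  rw [h, List.append_nil] at this
  exact this

theorem linesRef_cons_of_ne (c : Char) (cs : List Char) (hc : c ≠ '\n') :
    linesRef (c :: cs) = (linesRef cs).modifyHead (c :: ·) := by
  have hd : (c :: cs).dropWhile (· ≠ '\n') = cs.dropWhile (· ≠ '\n') := by simp [hc]
  have ht : (c :: cs).takeWhile (· ≠ '\n') = c :: cs.takeWhile (· ≠ '\n') := by simp [hc]
  cases h : cs.dropWhile (· ≠ '\n') with
  | nil =>
    rw [linesRef_of_drop_nil cs h, linesRef_of_drop_nil (c :: cs) (hd.trans h)]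
    simp
  | cons x rest =>
    rw [linesRef_of_drop_cons cs x rest h, linesRef_of_drop_cons (c :: cs) x rest (hd.trans h), ht]
    simp

theorem linesRef_cons_newline (cs : List Char) :
    linesRef ('\n' :: cs) = [] :: linesRef cs := by
  have hd : ('\n' :: cs).dropWhile (· ≠ '\n') = '\n' :: cs := by simp
  rw [linesRef_of_drop_cons ('\n' :: cs) '\n' cs hd]
  simp

-- splitOn.go with enough fuel computes linesRef (with the current chunk and accumulator)
theorem go_eq_linesRef : ∀ (fuel : Nat) (l cur : List Char) (acc : List (List Char)),
    l.length ≤ fuel →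
    PySem.Chars.splitOn.go ['\n'] fuel l cur acc =
      acc.reverse ++ (linesRef l).modifyHead (cur.reverse ++ ·) := by
  intro fuel
  induction fuel with
  | zero =>
    intro l cur acc hl
    have : l = [] := by
      cases l with
      | nil => rfl
      | cons a t => simp at hl
    subst this
    rw [linesRef_of_drop_nil [] rfl]
    simp [PySem.Chars.splitOn.go]
  | succ n ih =>
    intro l cur acc hl
    cases l with
    | nil =>
      rw [linesRef_of_drop_nil [] rfl]
      simp [PySem.Chars.splitOn.go]
    | cons c t =>
      by_cases hc : c = '\n'
      · subst hc
        have hpre : List.isPrefixOf ['\n'] ('\n' :: t) = true := by simp [List.isPrefixOf]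
        rw [PySem.Chars.splitOn.go]
        simp only [hpre, if_true]
        have ht : t.length ≤ n := by simpa using hl
        rw [show List.drop (List.length ['\n']) ('\n' :: t) = t by simp]
        rw [ih t [] (cur.reverse :: acc) ht]
        rw [linesRef_cons_newline]
        cases hlr : linesRef t with
        | nil => exact absurd hlr (linesRef_ne_nil t)
        | cons a L => simp
      · have hpre : List.isPrefixOf ['\n'] (c :: t) = false := by
          simp only [List.isPrefixOf, Bool.and_eq_false_iff, beq_eq_false_iff_ne, ne_eq]
          exact Or.inl (fun hh => hc hh.symm)
        rw [PySem.Chars.splitOn.go]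
        simp only [hpre, Bool.false_eq_true, if_false]
        have ht : t.length ≤ n := by simpa using hl
        rw [ih t (c :: cur) acc ht]
        rw [linesRef_cons_of_ne c t hc]
        cases hlr : linesRef t with
        | nil => exact absurd hlr (linesRef_ne_nil t)
        | cons a L => simp

theorem splitOn_eq_linesRef (cs : List Char) :
    PySem.Chars.splitOn cs ['\n'] = linesRef cs := by
  rw [PySem.Chars.splitOn]
  rw [go_eq_linesRef (cs.length + 1) cs [] [] (Nat.le_succ _)]
  cases hlr : linesRef cs with
  | nil => exact absurd hlr (linesRef_ne_nil cs)
  | cons a L => simp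

-- joining linesRef back with '\n' restores the text
theorem join_linesRef (cs : List Char) : PySem.Chars.join ['\n'] (linesRef cs) = cs := by
  cases h : cs.dropWhile (· ≠ '\n') with
  | nil =>
    rw [linesRef_of_drop_nil cs h, PySem.Chars.join_singleton]
  | cons x rest =>
    have hx := drop_head_newline cs x rest h
    subst hx
    have hsplit := take_drop_split cs '\n' rest h
    have ihr := join_linesRef rest
    rw [linesRef_of_drop_cons cs '\n' rest h]
    cases hlr : linesRef rest with
    | nil => exact absurd hlr (linesRef_ne_nil rest)
    | cons a L =>
      rw [hlr] at ihr
      rw [PySem.Chars.join_cons_cons, ihr]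
      simpa using hsplit
termination_by cs.length
decreasing_by
  have h1 : (cs.dropWhile (· ≠ '\n')).length ≤ cs.length := List.length_dropWhile_le _ _
  rw [h] at h1
  simpa using Nat.lt_of_lt_of_le (Nat.lt_succ_self _) h1

theorem addLoopA_ne_nil (sAdd : List Char) (L : List (List Char)) (h : L ≠ []) :
    addLoopA sAdd L ≠ [] := by
  cases L with
  | nil => exact absurd rfl h
  | cons a t => rw [addLoopA]; split <;> simp

theorem join_nil_sep_flatten : ∀ (L : List (List Char)), PySem.Chars.join [] L = L.flatten
  | [] => by rw [PySem.Chars.join_nil]; rfl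
  | [a] => by rw [PySem.Chars.join_singleton]; simp
  | a :: b :: r => by
      rw [PySem.Chars.join_cons_cons, join_nil_sep_flatten (b :: r)]
      simp

theorem join_empty_append (out : List (List Char)) (x : List Char) :
    PySem.Chars.join [] (out ++ [x]) = PySem.Chars.join [] out ++ x := by
  rw [join_nil_sep_flatten, join_nil_sep_flatten]
  simp

-- the main loop invariant
theorem bLoop_eq (t sAdd : List Char) : ∀ (cs : List Char) (out : List (List Char)),
    bLoop t sAdd out cs =
      if (linesRef cs).any (fun l => PySem.Chars.startswith l ['#', ' ']) then
        PySem.Chars.join [] out ++ PySem.Chars.join ['\n'] (addLoopA sAdd (linesRef cs))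
      else t := by
  intro cs
  induction hn : cs.length using Nat.strong_induction_on generalizing cs with
  | _ n ih =>
  intro out
  rw [bLoop]
  by_cases hh : PySem.Chars.startswith (cs.takeWhile (· ≠ '\n')) ['#', ' '] = true
  · simp only [hh, if_true]
    rw [join_empty_append]
    cases hd : cs.dropWhile (· ≠ '\n') with
    | nil =>
      have htake := take_eq_of_drop_nil cs hd
      rw [linesRef_of_drop_nil cs hd]
      rw [htake] at hh
      simp only [List.any_cons, List.any_nil, hh, Bool.true_or, if_true]
      rw [addLoopA]
      simp only [hh, if_true]
      rw [PySem.Chars.join_cons_cons, PySem.Chars.join_singleton, htake]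
      simp
    | cons x tail =>
      have hx := drop_head_newline cs x tail hd
      subst hx
      rw [linesRef_of_drop_cons cs '\n' tail hd]
      simp only [List.any_cons, hh, Bool.true_or, if_true]
      rw [addLoopA]
      simp only [hh, if_true]
      cases hlr : linesRef tail with
      | nil => exact absurd hlr (linesRef_ne_nil tail)
      | cons a L =>
        have hjr : PySem.Chars.join ['\n'] (a :: L) = tail := by
          have := join_linesRef tail
          rwa [hlr] at this
        rw [PySem.Chars.join_cons_cons, PySem.Chars.join_cons_cons, hjr]
        simp
  · simp only [hh, Bool.false_eq_true, if_false]
    split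
    · next hd =>
      have htake := take_eq_of_drop_nil cs hd
      rw [linesRef_of_drop_nil cs hd]
      rw [htake] at hh
      simp [hh]
    · next x tail hd =>
      have hx := drop_head_newline cs x tail hd
      subst hx
      have hlen : tail.length < n := by
        have h1 : (cs.dropWhile (· ≠ '\n')).length ≤ cs.length := List.length_dropWhile_le _ _
        rw [hd] at h1
        rw [← hn]
        simpa using Nat.lt_of_lt_of_le (Nat.lt_succ_self _) h1
      rw [ih tail.length hlen tail rfl]
      rw [linesRef_of_drop_cons cs '\n' tail hd]
      simp only [List.any_cons, hh, Bool.false_or]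
      split
      · next hany =>
        rw [join_empty_append]
        rw [addLoopA]
        simp only [hh, Bool.false_eq_true, if_false]
        cases hlr : addLoopA sAdd (linesRef tail) with
        | nil =>
          exact absurd hlr (addLoopA_ne_nil sAdd _ (linesRef_ne_nil tail))
        | cons a L =>
          rw [PySem.Chars.join_cons_cons]
          simp
      · next hany => rfl

theorem addLoopA_id (sAdd : List Char) (L : List (List Char))
    (h : ∀ l ∈ L, PySem.Chars.startswith l ['#', ' '] = false) : addLoopA sAdd L = L := by
  induction L with
  | nil => rfl
  | cons a t ih =>
    rw [addLoopA]
    have ha := h a (by simp)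
    simp only [ha, Bool.false_eq_true, if_false]
    rw [ih (fun l hl => h l (by simp [hl]))]

-- ===== VERDICT (by name: the statement is the Claim_ definition above) =====
theorem add_after_h1_spec : Claim_equal_add_after_h1 := by
  intro t s _
  unfold Spec_add_after_h1 add_after_h1 add_after_h1_alt
  rw [splitOn_eq_linesRef]
  rw [bLoop_eq t.toList s.toList t.toList []]
  show String.ofList (PySem.Chars.join ['\n'] (addLoopA s.toList (linesRef t.toList))) = _
  split
  · next h => rw [PySem.Chars.join_nil]; simp
  · next h =>
    -- no H1 line: the A-side loop is the identity, and joining restores the text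
    have hall : ∀ l ∈ linesRef t.toList, PySem.Chars.startswith l ['#', ' '] = false := by
      intro l hl
      have h' : (linesRef t.toList).any (fun l => PySem.Chars.startswith l ['#', ' ']) = false := by
        simpa using h
      simpa using (List.any_eq_false.mp h') l hl
    rw [addLoopA_id s.toList _ hall, join_linesRef]
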